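-- pv_equiv track=rewrite | github.com/kongshifer/strack | tools/pack_input.py | lex_zone
-- ===== SOURCE A (Python) =====
-- def lex_zone(expr: str) -> list[str]:
--     tokens: list[str] = []
--     current = []
--     special = {"(", ")", "|", "~"}
--     for char in expr:
--         if char in special:
--             if current:
--                 tokens.append("".join(current))
--                 current = []
--             tokens.append(char)
--         elif char.isspace():
--             if current:
--                 tokens.append("".join(current))
--                 current = []
--         else:
--             current.append(char)
--     if current:
--         tokens.append("".join(current))
--     return tokens
-- ===== SOURCE B (Python) =====
-- import re
--
-- def lex_zone(expr: str) -> list[str]: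
--     return re.findall(r'[()|~]|[^\s()|~]+', expr)
-- ===== Notes on version B (the rewrite author's own statement) =====
-- stated objective: idiomatic
-- what changed: Replaced the explicit character loop with its buffer/flush state by a single re.findall whose alternation emits special characters and maximal non-space non-special runs directly.
import Mathlib
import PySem

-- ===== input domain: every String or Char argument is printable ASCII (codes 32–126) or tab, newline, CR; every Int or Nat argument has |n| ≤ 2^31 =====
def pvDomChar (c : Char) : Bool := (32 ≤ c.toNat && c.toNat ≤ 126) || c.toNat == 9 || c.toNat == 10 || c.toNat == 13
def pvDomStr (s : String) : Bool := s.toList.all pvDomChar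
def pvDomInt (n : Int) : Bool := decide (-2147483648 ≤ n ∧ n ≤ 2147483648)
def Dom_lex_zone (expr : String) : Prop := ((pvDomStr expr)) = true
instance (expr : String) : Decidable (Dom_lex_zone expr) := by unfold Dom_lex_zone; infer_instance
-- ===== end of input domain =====

-- B replaces A's character-by-character buffer/flush loop with a single regex findall
-- (idiomatic); the Lean port of B transcribes this regex's matching semantics by hand
-- (each special char its own match, else a maximal run of word chars), exact for this pattern.

-- ===== PORT A =====
-- char ∈ special = {"(", ")", "|", "~"}
def pvSpecialA (c : Char) : Bool := c == '(' || c == ')' || c == '|' || c == '~'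

-- the for-loop over expr with state (tokens, current), then the final flush
def pvGoA : List Char → List String → List Char → List String
  | [], tokens, current =>
      if current = [] then tokens else tokens ++ [String.ofList current]
  | c :: rest, tokens, current =>
      if pvSpecialA c then
        pvGoA rest ((if current = [] then tokens else tokens ++ [String.ofList current]) ++ [String.ofList [c]]) []
      else if PySem.Chars.isspace c then
        pvGoA rest (if current = [] then tokens else tokens ++ [String.ofList current]) []
      else
        pvGoA rest tokens (current ++ [c])

def lex_zone (expr : String) : List String := pvGoA expr.toList [] []

-- ===== PORT B =====
-- the regex character classes of r'[()|~]|[^\s()|~]+'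
def pvSpecialB (c : Char) : Bool := c == '(' || c == ')' || c == '|' || c == '~'
-- \s (by code point; agrees with Python's str.isspace on the ASCII domain)
def pvReSpace (c : Char) : Bool :=
  c.toNat == 32 || c.toNat == 9 || c.toNat == 10 || c.toNat == 13 || c.toNat == 11 || c.toNat == 12
def pvWordChar (c : Char) : Bool := !(pvReSpace c || pvSpecialB c)

-- hand transcription of re.findall for this pattern: a special char is its own
-- match, whitespace matches nothing, otherwise a maximal run of word chars is one match
def pvFindall : List Char → List String
  | [] => []
  | c :: rest =>
      if pvSpecialB c then String.ofList [c] :: pvFindall rest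
      else if pvReSpace c then pvFindall rest
      else String.ofList (c :: rest.takeWhile pvWordChar) :: pvFindall (rest.dropWhile pvWordChar)
termination_by l => l.length
decreasing_by
  · simp
  · simp
  · simpa using Nat.lt_succ_of_le (List.length_dropWhile_le _ _)

def lex_zone_alt (expr : String) : List String := pvFindall expr.toList

-- ===== PRECONDITION & SPEC =====
def Spec_lex_zone (expr : String) (out : List String) : Prop := out = lex_zone_alt expr
instance (expr : String) (out : List String) : Decidable (Spec_lex_zone expr out) := by unfold Spec_lex_zone; infer_instance

-- ===== CLAIM (what is proved, stated in full; the proofs are below) =====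
def Claim_equal_lex_zone : Prop := ∀ (expr : String), Dom_lex_zone expr → Spec_lex_zone expr (lex_zone expr)

-- ===== LEMMAS AND PROOFS =====

-- on the domain the two whitespace predicates agree
theorem pvSpace_eq (c : Char) (h : pvDomChar c = true) :
    PySem.Chars.isspace c = pvReSpace c := by
  simp only [pvDomChar, Bool.or_eq_true, Bool.and_eq_true, decide_eq_true_eq, beq_iff_eq] at h
  rw [Bool.eq_iff_iff]
  simp only [PySem.Chars.isspace, pvReSpace, Bool.or_eq_true, Bool.and_eq_true,
    decide_eq_true_eq, beq_iff_eq]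
  omega

-- the accumulated token list is a pure prefix of the result
theorem pvGoA_prefix (l : List Char) (tokens : List String) (current : List Char) :
    pvGoA l tokens current = tokens ++ pvGoA l [] current := by
  induction l generalizing tokens current with
  | nil => simp only [pvGoA]; split <;> simp
  | cons c rest ih =>
      simp only [pvGoA, List.nil_append]
      split
      · rw [ih]; conv_rhs => rw [ih]
        split <;> simp
      · split
        · rw [ih]; conv_rhs => rw [ih]
          split <;> simp
        · exact ih tokens (current ++ [c])

-- main invariant relating A's loop (with pending buffer) to B's maximal-run scan
theorem pvGoA_eq (l : List Char) : ∀ (current : List Char), l.all pvDomChar = true →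
    pvGoA l [] current =
      if current = [] then pvFindall l
      else String.ofList (current ++ l.takeWhile pvWordChar) :: pvFindall (l.dropWhile pvWordChar) := by
  induction l with
  | nil => intro current _; simp only [pvGoA, pvFindall]; split <;> simp [pvFindall]
  | cons c rest ih =>
      intro current hl
      simp only [List.all_cons, Bool.and_eq_true] at hl
      obtain ⟨hc, hrest⟩ := hl
      simp only [pvGoA]
      by_cases hs : pvSpecialB c
      · have hw : pvWordChar c = false := by simp [pvWordChar, hs]
        rw [if_pos (show pvSpecialA c = true from hs), pvGoA_prefix, ih [] hrest]
        split
        · simp [pvFindall, hs]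
        · simp [hw, pvFindall, hs]
      · have hs' : pvSpecialB c = false := by simpa using hs
        have hsA : pvSpecialA c = false := hs'
        rw [if_neg (by simp [hsA]), pvSpace_eq c hc]
        by_cases hsp : pvReSpace c = true
        · have hw : pvWordChar c = false := by simp [pvWordChar, hsp]
          rw [if_pos hsp, pvGoA_prefix, ih [] hrest]
          split
          · simp [pvFindall, hs, hsp]
          · simp [hw, pvFindall, hs, hsp]
        · have hw : pvWordChar c = true := by simp [pvWordChar, hsp, hs]
          rw [if_neg hsp, ih (current ++ [c]) hrest]
          have hne : current ++ [c] ≠ [] := by simp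
          rw [if_neg hne]
          split
          · rename_i h; subst h
            simp [pvFindall, hs', hsp]
          · simp [hw]

-- ===== VERDICT (by name: the statement is the Claim_ definition above) =====
theorem lex_zone_spec : Claim_equal_lex_zone := by
  intro expr hdom
  unfold Spec_lex_zone lex_zone lex_zone_alt
  rw [pvGoA_eq expr.toList [] hdom]
  simp
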